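-- pv_equiv track=rewrite | github.com/MounaKallu/Language-Classification | LanguageClassificaiton.py | f9_wordlinecotaints_frequent_dut_words
-- ===== SOURCE A (Python) =====
-- def f9_wordlinecotaints_frequent_dut_words(line):
--     ducth_list = ['naar', 'onze', 'deze', 'ons', 'niet', 'ze', 'wij', 'ze', 'er', 'hun', 'be', 'met', 'zo', 'over',
--                   'hem', 'weten', 'jouw', 'dan', 'ook', 'hij', 'zijn', 'ik', 'het', 'voor', 'meest']
--     line = line.lower().replace(",", "")
--     words = line.split(" ")
--     for word in words:
--         if word in ducth_list:
--             return "False"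
--     return "True"
-- ===== SOURCE B (Python) =====
-- def f9_wordlinecotaints_frequent_dut_words(line):
--     ducth_list = ['naar', 'onze', 'deze', 'ons', 'niet', 'ze', 'wij', 'ze', 'er', 'hun', 'be', 'met', 'zo', 'over',
--                   'hem', 'weten', 'jouw', 'dan', 'ook', 'hij', 'zijn', 'ik', 'het', 'voor', 'meest']
--     # No splitting: pad the normalized line with spaces and look for each Dutch
--     # word, surrounded by spaces, as a substring of the padded line; a word of
--     # the space-split of the line equals w exactly when the padded pattern occurs.
--     padded = " " + line.lower().replace(",", "") + " "
--     if any(" " + w + " " in padded for w in ducth_list):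
--         return "False"
--     return "True"
-- ===== Notes on version B (the rewrite author's own statement) =====
-- stated objective: alternative
-- what changed: B never splits the line into words: it pads the normalized line with a leading and trailing space and tests, for each Dutch word, whether that word surrounded by spaces occurs as a substring of the padded line, replacing the split-and-scan with substring search.
import Mathlib
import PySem

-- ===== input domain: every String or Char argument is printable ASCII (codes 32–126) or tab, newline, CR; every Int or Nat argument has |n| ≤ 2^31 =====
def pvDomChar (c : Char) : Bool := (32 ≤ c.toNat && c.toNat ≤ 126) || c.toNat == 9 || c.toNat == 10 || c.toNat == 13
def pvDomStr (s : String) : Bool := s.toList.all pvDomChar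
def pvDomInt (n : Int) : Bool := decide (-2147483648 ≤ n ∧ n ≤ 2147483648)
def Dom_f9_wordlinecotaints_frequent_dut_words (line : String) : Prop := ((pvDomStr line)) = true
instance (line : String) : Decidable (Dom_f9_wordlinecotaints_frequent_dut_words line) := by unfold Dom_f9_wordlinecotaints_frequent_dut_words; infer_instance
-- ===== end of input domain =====

-- B replaces A's split-into-words-and-scan with substring search: it pads the normalized
-- line with spaces and looks for each Dutch word, space-delimited, in the padded line
-- (alternative algorithm, same cost).

-- ===== PORT A =====
def pvDutchList : List String := ["naar", "onze", "deze", "ons", "niet", "ze", "wij", "ze", "er", "hun", "be", "met", "zo", "over",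
  "hem", "weten", "jouw", "dan", "ook", "hij", "zijn", "ik", "het", "voor", "meest"]

-- A's for-loop over the line's words with early return, as structural recursion
def pvScanWords : List String → String
  | [] => "True"
  | w :: ws => if w ∈ pvDutchList then "False" else pvScanWords ws

def f9_wordlinecotaints_frequent_dut_words (line : String) : String :=
  let line := PySem.Str.replace (PySem.Str.lower line) "," ""
  let words := (PySem.Str.split? line " ").getD []   -- sep " " ≠ "" so split? is always some
  pvScanWords words

-- ===== PORT B =====
def f9_wordlinecotaints_frequent_dut_words_alt (line : String) : String :=
  let padded := " " ++ PySem.Str.replace (PySem.Str.lower line) "," "" ++ " "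
  if pvDutchList.any (fun w => PySem.Str.isIn (" " ++ w ++ " ") padded) then "False"
  else "True"

-- ===== PRECONDITION & SPEC =====
def Spec_f9_wordlinecotaints_frequent_dut_words (line : String) (out : String) : Prop := out = f9_wordlinecotaints_frequent_dut_words_alt line
instance (line : String) (out : String) : Decidable (Spec_f9_wordlinecotaints_frequent_dut_words line out) := by unfold Spec_f9_wordlinecotaints_frequent_dut_words; infer_instance

-- ===== CLAIM (what is proved, stated in full; the proofs are below) =====
def Claim_equal_f9_wordlinecotaints_frequent_dut_words : Prop := ∀ (line : String), Dom_f9_wordlinecotaints_frequent_dut_words line → Spec_f9_wordlinecotaints_frequent_dut_words line (f9_wordlinecotaints_frequent_dut_words line)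

-- ===== LEMMAS AND PROOFS =====

-- a clean structural model of splitting a char list on ' '
def pvGo (cur : List Char) : List Char → List (List Char)
  | [] => [cur.reverse]
  | x :: rest => if x = ' ' then cur.reverse :: pvGo [] rest else pvGo (x :: cur) rest

theorem pvGo_eq_go (fuel : Nat) : ∀ (l cur : List Char) (acc : List (List Char)),
    l.length ≤ fuel →
    PySem.Chars.splitOn.go [' '] fuel l cur acc = acc.reverse ++ pvGo cur l := by
  induction fuel with
  | zero =>
    intro l cur acc h
    have : l = [] := List.length_eq_zero_iff.mp (Nat.le_zero.mp h)
    subst this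
    rw [PySem.Chars.splitOn.go]
    simp [pvGo]
  | succ n ih =>
    intro l cur acc h
    cases l with
    | nil => rw [PySem.Chars.splitOn.go]; simp [pvGo]; omega
    | cons x rest =>
      rw [PySem.Chars.splitOn.go]
      by_cases hx : x = ' '
      · subst hx
        simp only [List.isPrefixOf]
        rw [if_pos (by simp)]
        simp only [List.length_cons, Nat.add_le_add_iff_right] at h
        rw [ih _ _ _ (by simpa using h)]
        have hstep : pvGo cur (' ' :: rest) = cur.reverse :: pvGo [] rest := by simp [pvGo]
        rw [hstep]
        simp
      · simp only [List.isPrefixOf]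
        rw [if_neg (by simp [Ne.symm hx]), ih _ _ _ (by simpa using Nat.le_of_succ_le_succ h)]
        simp [pvGo, hx]

theorem splitOn_eq_pvGo (s : List Char) : PySem.Chars.splitOn s [' '] = pvGo [] s := by
  unfold PySem.Chars.splitOn
  rw [pvGo_eq_go (s.length + 1) s [] [] (Nat.le_succ _)]
  simp

-- the space-padded line is the concatenation of the space-prefixed pieces plus a final space
def pvJoinPad (pieces : List (List Char)) : List Char :=
  (pieces.map (fun p => ' ' :: p)).flatten ++ [' ']

theorem pvJoinPad_pvGo : ∀ (l cur : List Char),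
    pvJoinPad (pvGo cur l) = ' ' :: cur.reverse ++ l ++ [' '] := by
  intro l
  induction l with
  | nil => intro cur; simp [pvGo, pvJoinPad]
  | cons x rest ih =>
    intro cur
    by_cases hx : x = ' '
    · subst hx
      have hstep : pvGo cur (' ' :: rest) = cur.reverse :: pvGo [] rest := by simp [pvGo]
      have hjp : pvJoinPad (cur.reverse :: pvGo [] rest)
          = ' ' :: cur.reverse ++ pvJoinPad (pvGo [] rest) := by
        simp [pvJoinPad]
      rw [hstep, hjp, ih []]
      simp
    · simp only [pvGo, if_neg hx]
      rw [ih (x :: cur)]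
      simp
theorem pvGo_space_free : ∀ (l cur : List Char), ' ' ∉ cur →
    ∀ p ∈ pvGo cur l, ' ' ∉ p := by
  intro l
  induction l with
  | nil =>
    intro cur hc p hp
    simp [pvGo] at hp
    subst hp; simpa using hc
  | cons x rest ih =>
    intro cur hc p hp
    by_cases hx : x = ' '
    · subst hx
      have hstep : pvGo cur (' ' :: rest) = cur.reverse :: pvGo [] rest := by simp [pvGo]
      rw [hstep] at hp
      rcases List.mem_cons.mp hp with h | h
      · subst h; simpa using hc
      · exact ih [] (by simp) p h
    · simp only [pvGo, if_neg hx] at hp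
      exact ih (x :: cur) (by simp [hc, Ne.symm hx]) p hp

theorem pvJoinPad_head (pieces : List (List Char)) : ∃ t, pvJoinPad pieces = ' ' :: t := by
  cases pieces with
  | nil => exact ⟨[], rfl⟩
  | cons p rest => exact ⟨p ++ pvJoinPad rest, by simp [pvJoinPad]⟩

-- the key correspondence: a space-free word is among the pieces iff its
-- space-delimited pattern occurs in the padded concatenation
theorem pvMem_iff_infix (w : List Char) (hw : ' ' ∉ w) :
    ∀ (pieces : List (List Char)), (∀ p ∈ pieces, ' ' ∉ p) →
    ((' ' :: w ++ [' ']) <:+: pvJoinPad pieces ↔ w ∈ pieces) := by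
  intro pieces
  induction pieces with
  | nil =>
    intro _
    simp only [List.not_mem_nil, iff_false]
    intro h
    have := h.length_le
    simp [pvJoinPad] at this
  | cons p rest ih =>
    intro hfree
    have hp : ' ' ∉ p := hfree p (List.mem_cons_self ..)
    have hrest : ∀ q ∈ rest, ' ' ∉ q := fun q hq => hfree q (List.mem_cons_of_mem _ hq)
    have hpad : pvJoinPad (p :: rest) = ' ' :: p ++ pvJoinPad rest := by simp [pvJoinPad]
    constructor
    · rintro ⟨u, v, huv⟩
      rw [hpad] at huv
      cases u with
      | nil =>
        -- occurrence at the start: w = p by taking the space-free prefix of both sides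
        simp only [List.nil_append] at huv
        have huv' : w ++ ' ' :: (v : List Char) = p ++ pvJoinPad rest := by
          have := congrArg List.tail huv
          simpa using this
        have hwall : ∀ c ∈ w, (fun c => decide (c ≠ ' ')) c = true := by
          intro c hc
          simp only [decide_eq_true_eq]
          intro h; exact hw (h ▸ hc)
        have hpall : ∀ c ∈ p, (fun c => decide (c ≠ ' ')) c = true := by
          intro c hc
          simp only [decide_eq_true_eq]
          intro h; exact hp (h ▸ hc)
        have h1 : (w ++ ' ' :: v).takeWhile (fun c => decide (c ≠ ' ')) = w := by
          rw [List.takeWhile_append_of_pos hwall]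
          simp
        have h2 : (p ++ pvJoinPad rest).takeWhile (fun c => decide (c ≠ ' ')) = p := by
          obtain ⟨t, ht⟩ := pvJoinPad_head rest
          rw [ht, List.takeWhile_append_of_pos hpall]
          simp
        have hwp : w = p := by rw [← h1, ← h2, huv']
        rw [hwp]
        exact List.mem_cons_self ..
      | cons u0 u' =>
        -- occurrence further right: it lies wholly inside the rest
        have hu0 : u0 = ' ' := by
          have := congrArg (fun l => l.head?) huv
          simpa using this
        subst hu0
        have huv' : u' ++ (' ' :: w ++ [' ']) ++ v = p ++ pvJoinPad rest := by
          have := congrArg List.tail huv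
          simpa using this
        have hpre1 : u' <+: p ++ pvJoinPad rest := ⟨(' ' :: w ++ [' ']) ++ v, by
          simpa [List.append_assoc] using huv'⟩
        have hpre2 : p <+: p ++ pvJoinPad rest := ⟨pvJoinPad rest, rfl⟩
        rcases List.prefix_or_prefix_of_prefix hpre1 hpre2 with hup | hpu
        · -- u' is a prefix of p; the pattern's leading space forces u' = p
          obtain ⟨t, ht⟩ := hup
          cases t with
          | nil =>
            simp only [List.append_nil] at ht
            subst ht
            have h3 : (' ' :: w ++ [' ']) ++ v = pvJoinPad rest := by
              have hd := congrArg (List.drop u'.length) huv'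
              simpa [List.append_assoc, List.drop_left] using hd
            exact List.mem_cons_of_mem _ ((ih hrest).mp ⟨[], v, by simpa using h3⟩)
          | cons t0 t' =>
            exfalso
            rw [← ht] at huv'
            have h3 : (' ' :: w ++ [' ']) ++ v = (t0 :: t') ++ pvJoinPad rest := by
              have hd := congrArg (List.drop u'.length) huv'
              simpa [List.append_assoc, List.drop_left] using hd
            have ht0 : (' ' : Char) = t0 := by
              have := congrArg (fun l => l.head?) h3
              simpa using this
            exact hp (by rw [← ht, ← ht0]; simp)
        · -- p is a prefix of u': the whole pattern occurs inside pvJoinPad rest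
          obtain ⟨t, ht⟩ := hpu
          rw [← ht] at huv'
          have h3 : t ++ ((' ' :: w ++ [' ']) ++ v) = pvJoinPad rest := by
            have hd := congrArg (List.drop p.length) huv'
            simpa [List.append_assoc, List.drop_left] using hd
          exact List.mem_cons_of_mem _ ((ih hrest).mp ⟨t, v, by simpa [List.append_assoc] using h3⟩)
    · intro hmem
      rcases List.mem_cons.mp hmem with rfl | hmem
      · obtain ⟨t, ht⟩ := pvJoinPad_head rest
        exact ⟨[], t, by simp [hpad, ht]⟩
      · obtain ⟨u, v, huv⟩ := (ih hrest).mpr hmem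
        exact ⟨' ' :: p ++ u, v, by simp [hpad, ← huv, List.append_assoc]⟩

-- A's early-return scan answers "does some word lie in the Dutch list?"
theorem pvScanWords_eq_any (ws : List String) :
    pvScanWords ws = (if ws.any (fun w => decide (w ∈ pvDutchList)) then "False" else "True") := by
  induction ws with
  | nil => simp [pvScanWords]
  | cons w ws ih =>
    by_cases h : w ∈ pvDutchList <;> simp [pvScanWords, h, ih]

theorem pvDutch_space_free : ∀ w ∈ pvDutchList, ' ' ∉ w.toList := by decide

-- ===== VERDICT (by name: the statement is the Claim_ definition above) =====
theorem f9_wordlinecotaints_frequent_dut_words_spec : Claim_equal_f9_wordlinecotaints_frequent_dut_words := by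
  intro line _
  unfold Spec_f9_wordlinecotaints_frequent_dut_words f9_wordlinecotaints_frequent_dut_words f9_wordlinecotaints_frequent_dut_words_alt
  set s := PySem.Str.replace (PySem.Str.lower line) "," "" with hs
  show pvScanWords ((PySem.Str.split? s " ").getD []) =
    (if (pvDutchList.any fun w => PySem.Str.isIn (" " ++ w ++ " ") (" " ++ s ++ " ")) = true then "False" else "True")
  have hnf : ∀ p ∈ pvGo [] s.toList, ' ' ∉ p := pvGo_space_free s.toList [] (by simp)
  have h := PySem.Str.split?_map s " "
  have h2 : PySem.Chars.split? s.toList " ".toList = some (pvGo [] s.toList) := by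
    simp [PySem.Chars.split?, splitOn_eq_pvGo]
  rw [h2] at h
  cases hq : PySem.Str.split? s " " with
  | none => rw [hq] at h; simp at h
  | some ws =>
    rw [hq] at h
    simp only [Option.map_some, Option.some.injEq] at h
    simp only [Option.getD_some]
    rw [pvScanWords_eq_any]
    have hbool : (ws.any (fun w => decide (w ∈ pvDutchList)))
        = (pvDutchList.any (fun w => PySem.Str.isIn (" " ++ w ++ " ") (" " ++ s ++ " "))) := by
      rw [Bool.eq_iff_iff]
      simp only [List.any_eq_true, decide_eq_true_eq]
      constructor
      · rintro ⟨w, hwmem, hdutch⟩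
        refine ⟨w, hdutch, ?_⟩
        rw [PySem.Str.isIn_eq, PySem.Chars.isIn_iff_infix]
        have hl : w.toList ∈ pvGo [] s.toList := by
          rw [← h]; exact List.mem_map_of_mem hwmem
        have hinf := (pvMem_iff_infix w.toList (hnf _ hl) _ hnf).mpr hl
        rw [pvJoinPad_pvGo s.toList []] at hinf
        simpa [String.toList_append] using hinf
      · rintro ⟨w, hw, hin⟩
        rw [PySem.Str.isIn_eq, PySem.Chars.isIn_iff_infix] at hin
        have hin' : (' ' :: w.toList ++ [' ']) <:+: pvJoinPad (pvGo [] s.toList) := by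
          rw [pvJoinPad_pvGo s.toList []]
          simpa [String.toList_append] using hin
        have hl := (pvMem_iff_infix w.toList (pvDutch_space_free w hw) _ hnf).mp hin'
        rw [← h] at hl
        obtain ⟨x, hx, hxe⟩ := List.mem_map.mp hl
        exact ⟨x, hx, (String.toList_inj.mp hxe) ▸ hw⟩
    rw [hbool]
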